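-- pv_equiv track=rewrite | github.com/nomadkaraoke/karaoke-prep | karaoke_gen/services/lyrics/formatter.py | _format_lyrics_text
-- ===== SOURCE A (Python) =====
-- def _format_lyrics_text(lyrics_text):
--     """
--     Format lyrics text.
--
--     Args:
--         lyrics_text: The lyrics text to format
--
--     Returns:
--         The formatted lyrics text
--     """
--     # Remove extra whitespace
--     formatted_text = lyrics_text.strip()
--
--     # Split into lines
--     lines = formatted_text.split("\n")
--
--     # Remove empty lines at the beginning and end
--     while lines and not lines[0].strip():
--         lines.pop(0)
--
--     while lines and not lines[-1].strip():
--         lines.pop()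
--
--     # Remove duplicate empty lines
--     formatted_lines = []
--     prev_empty = False
--     for line in lines:
--         is_empty = not line.strip()
--         if not (is_empty and prev_empty):
--             formatted_lines.append(line)
--         prev_empty = is_empty
--
--     # Join lines
--     formatted_text = "\n".join(formatted_lines)
--
--     return formatted_text
-- ===== SOURCE B (Python) =====
-- def _format_lyrics_text(lyrics_text):
--     lines = lyrics_text.strip().split("\n")
--     # One back-to-front pass: collapse each run of blank lines to its first
--     # line (kept verbatim) by replacing the later blank with the earlier one.
--     out = []
--     for line in reversed(lines):
--         if not line.strip() and out and not out[-1].strip():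
--             out[-1] = line
--         else:
--             out.append(line)
--     out.reverse()
--     # Blank runs are now single lines, so trimming each end is one check.
--     if out and not out[0].strip():
--         out = out[1:]
--     if out and not out[-1].strip():
--         out = out[:-1]
--     return "\n".join(out)
-- ===== Notes on version B (the rewrite author's own statement) =====
-- stated objective: alternative
-- what changed: Replaces A's four-stage pipeline (two while-pop trimming loops, then a forward dedup loop carrying a prev_empty flag) with a single back-to-front pass that collapses each blank run to its first line by overwriting, after which trimming each end is a single conditional slice instead of a loop.
import Mathlib
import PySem

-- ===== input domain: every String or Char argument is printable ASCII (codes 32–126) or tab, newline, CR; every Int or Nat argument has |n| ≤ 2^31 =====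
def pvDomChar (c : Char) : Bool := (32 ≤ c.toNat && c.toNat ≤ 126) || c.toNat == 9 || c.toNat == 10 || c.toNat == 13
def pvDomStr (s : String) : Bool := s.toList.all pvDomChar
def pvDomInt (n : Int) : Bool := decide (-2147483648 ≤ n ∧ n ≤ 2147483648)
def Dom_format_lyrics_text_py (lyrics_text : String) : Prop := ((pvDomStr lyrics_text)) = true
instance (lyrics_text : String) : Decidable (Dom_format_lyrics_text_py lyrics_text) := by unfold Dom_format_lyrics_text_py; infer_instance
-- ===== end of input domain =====

-- B makes one back-to-front pass that keeps the first line of each blank run, so end-trimming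
-- becomes a single check per end instead of A's while-pop loops + stateful forward dedup pass (alternative decomposition, same cost).


-- ===== PORT A =====
-- `not line.strip()`
def pvBlankA (l : List Char) : Bool := decide (PySem.Chars.strip l = [])

-- `while lines and not lines[0].strip(): lines.pop(0)`
def pvDropLeadA (ls : List (List Char)) : List (List Char) :=
  match ls with
  | [] => []
  | l :: t => if pvBlankA l then pvDropLeadA t else l :: t

-- `while lines and not lines[-1].strip(): lines.pop()`
def pvPopTrailA (ls : List (List Char)) : List (List Char) :=
  match h : ls.getLast? with
  | none => ls
  | some l => if pvBlankA l then pvPopTrailA ls.dropLast else ls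
  termination_by ls.length
  decreasing_by
    have hne : ls ≠ [] := by intro e; subst e; simp at h
    have : 0 < ls.length := List.length_pos_iff.mpr hne
    simp [List.length_dropLast]; omega

-- the `for line in lines` dedup loop body, state = (formatted_lines, prev_empty)
def pvStepA (st : List (List Char) × Bool) (line : List Char) : List (List Char) × Bool :=
  let isEmpty := pvBlankA line
  ((if isEmpty && st.2 then st.1 else st.1 ++ [line]), isEmpty)

def format_lyrics_text_py (lyrics_text : String) : String :=
  String.mk (PySem.Chars.join ['\n']
    ((pvPopTrailA (pvDropLeadA
        (PySem.Chars.splitOn (PySem.Chars.strip lyrics_text.toList) ['\n']))).foldl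
      pvStepA ([], false)).1)

-- ===== PORT B =====
def pvBlankB (l : List Char) : Bool := decide (PySem.Chars.strip l = [])

-- body of Source B's `for line in reversed(lines)` loop; the Lean accumulator's FRONT is the
-- Python list's END, so the whole reversed loop (+ final out.reverse()) is a foldr of this step
def pvStepB (line : List Char) (out : List (List Char)) : List (List Char) :=
  if pvBlankB line ∧ out ≠ [] ∧ pvBlankB out.headI then line :: out.tail else line :: out

-- `if out and not out[0].strip(): out = out[1:]`
def pvTrimHeadB (out : List (List Char)) : List (List Char) :=
  if out ≠ [] ∧ pvBlankB out.headI then out.tail else out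

-- `if out and not out[-1].strip(): out = out[:-1]`
def pvTrimTailB (out : List (List Char)) : List (List Char) :=
  if out ≠ [] ∧ pvBlankB (out.getLastD []) then out.dropLast else out

def format_lyrics_text_py_alt (lyrics_text : String) : String :=
  String.mk (PySem.Chars.join ['\n'] (pvTrimTailB (pvTrimHeadB
    ((PySem.Chars.splitOn (PySem.Chars.strip lyrics_text.toList) ['\n']).foldr
      pvStepB []))))

-- ===== PRECONDITION & SPEC =====
def Spec_format_lyrics_text_py (lyrics_text : String) (out : String) : Prop := out = format_lyrics_text_py_alt lyrics_text
instance (lyrics_text : String) (out : String) : Decidable (Spec_format_lyrics_text_py lyrics_text out) := by unfold Spec_format_lyrics_text_py; infer_instance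

-- ===== CLAIM (what is proved, stated in full; the proofs are below) =====
def Claim_equal_format_lyrics_text_py : Prop := ∀ (lyrics_text : String), Dom_format_lyrics_text_py lyrics_text → Spec_format_lyrics_text_py lyrics_text (format_lyrics_text_py lyrics_text)

-- ===== LEMMAS AND PROOFS =====

theorem pvBlankB_eq : pvBlankB = pvBlankA := rfl

-- functional form of A's dedup fold: pvFA prev ls
def pvFA (p : Bool) : List (List Char) → List (List Char)
  | [] => []
  | l :: t => if pvBlankA l && p then pvFA (pvBlankA l) t else l :: pvFA (pvBlankA l) t

theorem pvFoldA_eq (ls : List (List Char)) :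
    ∀ (acc : List (List Char)) (p : Bool),
      (ls.foldl pvStepA (acc, p)).1 = acc ++ pvFA p ls := by
  induction ls with
  | nil => intro acc p; simp [pvFA]
  | cons l t ih =>
    intro acc p
    simp only [List.foldl_cons, pvStepA, pvFA]
    by_cases h : (pvBlankA l && p) = true
    · rw [if_pos h, if_pos h, ih]
    · rw [if_neg h, if_neg h, ih]; simp

theorem pvFA_false_nil_iff (t : List (List Char)) : pvFA false t = [] ↔ t = [] := by
  cases t <;> simp [pvFA]

theorem pvFA_true_nil_iff (t : List (List Char)) :
    pvFA true t = [] ↔ ∀ l ∈ t, pvBlankA l = true := by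
  induction t with
  | nil => simp [pvFA]
  | cons l t ih =>
    by_cases h : pvBlankA l = true
    · simp [pvFA, h, ih]
    · simp [pvFA, h]

-- relation between the two prev-flags of pvFA
theorem pvFA_true_eq (t : List (List Char)) :
    pvFA true t = if pvFA false t ≠ [] ∧ pvBlankA (pvFA false t).headI then
        (pvFA false t).tail else pvFA false t := by
  cases t with
  | nil => simp [pvFA]
  | cons x t' => by_cases h : pvBlankA x = true <;> simp [pvFA, h]

-- B's collapse pass computes pvFA false
theorem pvFoldrB_eq (ls : List (List Char)) : ls.foldr pvStepB [] = pvFA false ls := by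
  induction ls with
  | nil => rfl
  | cons l t ih =>
    simp only [List.foldr_cons, ih, pvStepB, pvBlankB_eq]
    by_cases h : pvBlankA l = true
    · have : pvFA false (l :: t) = l :: pvFA true t := by simp [pvFA, h]
      rw [this, pvFA_true_eq t]
      by_cases hc : pvFA false t ≠ [] ∧ pvBlankA (pvFA false t).headI = true
      · rw [if_pos ⟨h, hc.1, hc.2⟩, if_pos hc]
      · rw [if_neg (by tauto), if_neg hc]
    · have hg : ¬ (pvBlankA l = true ∧ pvFA false t ≠ [] ∧ pvBlankA (pvFA false t).headI = true) := by tauto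
      rw [if_neg hg]
      simp [pvFA, h]

-- pvFA true drops the leading blank run
theorem pvFA_true_dropLead (t : List (List Char)) :
    pvFA true t = pvFA false (pvDropLeadA t) := by
  induction t with
  | nil => rfl
  | cons x t' ih =>
    by_cases h : pvBlankA x = true <;> simp [pvFA, pvDropLeadA, h, ih]

theorem pvTrimHead_eq (ls : List (List Char)) :
    pvTrimHeadB (pvFA false ls) = pvFA false (pvDropLeadA ls) := by
  cases ls with
  | nil => rfl
  | cons l t =>
    by_cases h : pvBlankA l = true
    · simp [pvFA, pvTrimHeadB, pvDropLeadA, pvBlankB_eq, h, pvFA_true_dropLead]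
    · simp [pvFA, pvTrimHeadB, pvDropLeadA, pvBlankB_eq, h]

theorem pvPopTrail_nil : pvPopTrailA [] = [] := by simp [pvPopTrailA]

theorem pvPopTrail_concat (xs : List (List Char)) (x : List Char) :
    pvPopTrailA (xs ++ [x]) = if pvBlankA x then pvPopTrailA xs else xs ++ [x] := by
  rw [pvPopTrailA.eq_def]
  split
  · next heq => simp at heq
  · next l' heq =>
    have hx : l' = x := by simpa using heq.symm
    subst hx
    simp

theorem pvPopTrail_cons (l : List Char) (t : List (List Char)) :
    pvPopTrailA (l :: t) =
      if pvPopTrailA t = [] then (if pvBlankA l then [] else [l])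
      else l :: pvPopTrailA t := by
  induction t using List.reverseRecOn with
  | nil =>
    rw [show l :: ([] : List (List Char)) = [] ++ [l] by simp, pvPopTrail_concat]
    simp [pvPopTrail_nil]
  | append_singleton xs x ih =>
    rw [show l :: (xs ++ [x]) = (l :: xs) ++ [x] by simp, pvPopTrail_concat,
      pvPopTrail_concat]
    by_cases hx : pvBlankA x = true
    · rw [if_pos hx, if_pos hx, ih]
    · rw [if_neg hx, if_neg hx, if_neg (by simp)]
      simp

theorem pvPopTrail_nil_iff (t : List (List Char)) :
    pvPopTrailA t = [] ↔ ∀ l ∈ t, pvBlankA l = true := by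
  induction t using List.reverseRecOn with
  | nil => simp [pvPopTrail_nil]
  | append_singleton xs x ih =>
    rw [pvPopTrail_concat]
    by_cases hx : pvBlankA x = true
    · simp only [if_pos hx, ih]
      constructor
      · intro h l hl
        rcases List.mem_append.mp hl with h1 | h1
        · exact h l h1
        · simpa [List.mem_singleton.mp h1] using hx
      · intro h l hl; exact h l (List.mem_append.mpr (Or.inl hl))
    · rw [if_neg hx]
      constructor
      · intro h; exact absurd h (by simp)
      · intro h; exact absurd (h x (by simp)) hx

theorem pvTrimTail_cons (l : List Char) (ys : List (List Char)) (h : ys ≠ []) :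
    pvTrimTailB (l :: ys) = l :: pvTrimTailB ys := by
  obtain ⟨z, zs, rfl⟩ := List.exists_cons_of_ne_nil h
  simp only [pvTrimTailB, List.getLastD_cons]
  by_cases hb : pvBlankB (zs.getLastD z) = true
  · rw [if_pos ⟨by simp, hb⟩, if_pos ⟨by simp, hb⟩]
    simp
  · rw [if_neg (fun c => hb c.2), if_neg (fun c => hb c.2)]

theorem pvTrimTail_eq (p : Bool) (ls : List (List Char)) :
    pvTrimTailB (pvFA p ls) = pvFA p (pvPopTrailA ls) := by
  induction ls generalizing p with
  | nil => simp [pvFA, pvPopTrail_nil, pvTrimTailB]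
  | cons l t ih =>
    rw [pvPopTrail_cons]
    by_cases hg : (pvBlankA l && p) = true
    · have hbl : pvBlankA l = true := by revert hg; cases pvBlankA l <;> simp
      have hp : p = true := by revert hg; cases p <;> simp
      subst hp
      have hfa : pvFA true (l :: t) = pvFA true t := by simp [pvFA, hbl]
      by_cases hpt : pvPopTrailA t = []
      · have hall : ∀ x ∈ t, pvBlankA x = true := (pvPopTrail_nil_iff t).mp hpt
        have h0 : pvFA true t = [] := (pvFA_true_nil_iff t).mpr hall
        simp [h0, hpt, hbl, pvTrimTailB, pvFA, pvBlankB_eq]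
      · rw [if_neg hpt, hfa]
        have h1 : pvFA true (l :: pvPopTrailA t) = pvFA true (pvPopTrailA t) := by
          simp [pvFA, hbl]
        rw [h1, ← ih true]
    · have hfa : pvFA p (l :: t) = l :: pvFA (pvBlankA l) t := by simp [pvFA, hg]
      by_cases hft : pvFA (pvBlankA l) t = []
      · by_cases hbl : pvBlankA l = true
        · rw [hbl] at hft
          have hall := (pvFA_true_nil_iff t).mp hft
          have hpt : pvPopTrailA t = [] := (pvPopTrail_nil_iff t).mpr hall
          rw [if_pos hpt, if_pos hbl, hfa, hbl, hft]
          simp [pvTrimTailB, hbl, pvFA, pvBlankB_eq]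
        · have hbl' : pvBlankA l = false := by revert hbl; cases pvBlankA l <;> simp
          rw [hbl'] at hft
          have ht : t = [] := (pvFA_false_nil_iff t).mp hft
          subst ht
          rw [if_pos pvPopTrail_nil, if_neg (by simp [hbl']), hfa, hbl', hft]
          simp [pvTrimTailB, hbl', pvBlankB_eq]
      · by_cases hpt : pvPopTrailA t = []
        · have hall := (pvPopTrail_nil_iff t).mp hpt
          have hbl' : pvBlankA l = false := by
            by_contra hh
            have hb : pvBlankA l = true := by revert hh; cases pvBlankA l <;> simp
            exact hft (by rw [hb]; exact (pvFA_true_nil_iff t).mpr hall)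
          rw [if_pos hpt, if_neg (by simp [hbl'])]
          rw [hbl'] at hfa hft
          obtain ⟨t0, t', rfl⟩ : ∃ t0 t', t = t0 :: t' := by
            cases t with
            | nil => exact absurd rfl hft
            | cons a b => exact ⟨a, b, rfl⟩
          have hb0 : pvBlankA t0 = true := hall t0 (by simp)
          have h2 : pvFA false (t0 :: t') = [t0] := by
            have : pvFA true t' = [] :=
              (pvFA_true_nil_iff t').mpr (fun x hx => hall x (by simp [hx]))
            simp [pvFA, hb0, this]
          rw [hfa, h2]
          simp [pvTrimTailB, hb0, pvFA, hbl', pvBlankB_eq]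
        · rw [if_neg hpt, hfa]
          have h3 : pvFA p (l :: pvPopTrailA t) = l :: pvFA (pvBlankA l) (pvPopTrailA t) := by
            simp [pvFA, hg]
          rw [h3, ← ih (pvBlankA l), pvTrimTail_cons _ _ hft]

theorem pvLines_eq (ls : List (List Char)) :
    pvTrimTailB (pvTrimHeadB (ls.foldr pvStepB [])) =
      ((pvPopTrailA (pvDropLeadA ls)).foldl pvStepA ([], false)).1 := by
  rw [pvFoldrB_eq, pvTrimHead_eq, pvTrimTail_eq, pvFoldA_eq]
  simp

-- ===== VERDICT (by name: the statement is the Claim_ definition above) =====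
theorem format_lyrics_text_py_spec : Claim_equal_format_lyrics_text_py := by
  intro s _
  unfold Spec_format_lyrics_text_py format_lyrics_text_py format_lyrics_text_py_alt
  rw [pvLines_eq]
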